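-- pv_equiv track=rewrite | github.com/pujichun/51Job | server/App/utils/DataFilter.py | split_level
-- ===== SOURCE A (Python) =====
-- from typing import List, Iterable, Dict
--
-- def split_level(squ: List) -> Dict:
--     level: Dict[str, int] = {"较低": 0, "一般": 0, "中等": 0, "较高": 0, "优秀": 0}
--     for i in squ:
--         if 0 < i < 3:
--             level["较低"] += 1
--         elif 3 <= i < 5:
--             level["一般"] += 1
--         elif 5 <= i < 8:
--             level["中等"] += 1
--         elif 8 <= i < 12:
--             level["较高"] += 1
--         elif i >= 12:
--             level["优秀"] += 1
--     return level
-- ===== SOURCE B (Python) =====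
-- import bisect
--
--
-- def split_level(squ):
--     s = sorted(squ)
--     pos = [bisect.bisect_left(s, c) for c in (1, 3, 5, 8, 12)] + [len(s)]
--     names = ["较低", "一般", "中等", "较高", "优秀"]
--     return {n: pos[k + 1] - pos[k] for k, n in enumerate(names)}
-- ===== Notes on version B (the rewrite author's own statement) =====
-- stated objective: alternative
-- what changed: Instead of a per-element if/elif counting loop, B sorts the list once and reads each bucket count off as the difference of two bisect_left positions of the bucket boundaries in the sorted list.
import Mathlib
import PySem

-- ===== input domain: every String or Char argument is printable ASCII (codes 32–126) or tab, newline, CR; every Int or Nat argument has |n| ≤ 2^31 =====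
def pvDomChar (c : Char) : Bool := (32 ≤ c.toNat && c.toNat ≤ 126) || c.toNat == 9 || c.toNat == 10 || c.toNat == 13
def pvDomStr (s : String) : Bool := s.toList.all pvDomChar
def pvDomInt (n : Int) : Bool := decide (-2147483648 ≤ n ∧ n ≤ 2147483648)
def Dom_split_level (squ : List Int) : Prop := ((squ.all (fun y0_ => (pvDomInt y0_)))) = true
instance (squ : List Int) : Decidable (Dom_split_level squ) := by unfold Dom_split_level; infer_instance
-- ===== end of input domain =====

-- B replaces A's per-element if/elif counting loop by a different algorithm: sort once,
-- then read each bucket count off as a difference of bisect_left positions of the boundaries.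

-- ===== PORT A =====
-- loop body of A's for-loop (the if/elif ladder updating the dict)
def pvStepA (level : PySem.Dict String Int) (i : Int) : PySem.Dict String Int :=
  if 0 < i ∧ i < 3 then level.modify "较低" 0 (· + 1)
  else if 3 ≤ i ∧ i < 5 then level.modify "一般" 0 (· + 1)
  else if 5 ≤ i ∧ i < 8 then level.modify "中等" 0 (· + 1)
  else if 8 ≤ i ∧ i < 12 then level.modify "较高" 0 (· + 1)
  else if 12 ≤ i then level.modify "优秀" 0 (· + 1)
  else level

def split_level (squ : List Int) : List (String × Int) :=
  let level : PySem.Dict String Int :=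
    PySem.Dict.ofList [("较低", 0), ("一般", 0), ("中等", 0), ("较高", 0), ("优秀", 0)]
  (squ.foldl pvStepA level).items

-- ===== PORT B =====
def pvNames : List String := ["较低", "一般", "中等", "较高", "优秀"]

def split_level_alt (squ : List Int) : List (String × Int) :=
  let s := PySem.List.sorted squ (fun x => x) false
  let pos : List Int :=
    (([1, 3, 5, 8, 12] : List Int).map (fun c => (PySem.List.bisectLeft s c : Int)))
      ++ [(s.length : Int)]
  (PySem.List.enumerate pvNames).map
    (fun kn => (kn.2, PySem.List.pyGetD pos (kn.1 + 1) 0 - PySem.List.pyGetD pos kn.1 0))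

-- ===== PRECONDITION & SPEC =====
def Spec_split_level (squ : List Int) (out : List (String × Int)) : Prop := out = split_level_alt squ
instance (squ : List Int) (out : List (String × Int)) : Decidable (Spec_split_level squ out) := by unfold Spec_split_level; infer_instance

-- ===== CLAIM (what is proved, stated in full; the proofs are below) =====
def Claim_equal_split_level : Prop := ∀ (squ : List Int), Dom_split_level squ → Spec_split_level squ (split_level squ)

-- ===== LEMMAS AND PROOFS =====

-- Int-valued bucket count (what A accumulates per key)
def pvCnt (p : Int → Prop) [DecidablePred p] (l : List Int) : Int :=
  (l.countP (fun i => decide (p i)) : Nat)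

lemma pvCnt_cons (p : Int → Prop) [DecidablePred p] (x : Int) (xs : List Int) :
    pvCnt p (x :: xs) = (if p x then 1 else 0) + pvCnt p xs := by
  unfold pvCnt
  by_cases h : p x <;> simp [h] <;> ring

-- one step of A's loop on a dict of the literal shape, values symbolic;
-- the five bucket conditions are mutually exclusive, so the plain (unguarded) forms suffice
lemma pv_stepA_shape (v0 v1 v2 v3 v4 : Int) (i : Int) :
    pvStepA (PySem.Dict.ofList [("较低", v0), ("一般", v1), ("中等", v2), ("较高", v3), ("优秀", v4)]) i
      = PySem.Dict.ofList
          [("较低", v0 + if 0 < i ∧ i < 3 then 1 else 0),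
           ("一般", v1 + if 3 ≤ i ∧ i < 5 then 1 else 0),
           ("中等", v2 + if 5 ≤ i ∧ i < 8 then 1 else 0),
           ("较高", v3 + if 8 ≤ i ∧ i < 12 then 1 else 0),
           ("优秀", v4 + if 12 ≤ i then 1 else 0)] := by
  unfold pvStepA
  split_ifs
  all_goals try (exfalso; omega)
  all_goals simp only [add_zero]
  all_goals rfl

-- A's fold in closed form: each key carries its bucket count
lemma pv_foldA (l : List Int) (v0 v1 v2 v3 v4 : Int) :
    l.foldl pvStepA
        (PySem.Dict.ofList [("较低", v0), ("一般", v1), ("中等", v2), ("较高", v3), ("优秀", v4)])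
      = PySem.Dict.ofList
          [("较低", v0 + pvCnt (fun i => 0 < i ∧ i < 3) l),
           ("一般", v1 + pvCnt (fun i => 3 ≤ i ∧ i < 5) l),
           ("中等", v2 + pvCnt (fun i => 5 ≤ i ∧ i < 8) l),
           ("较高", v3 + pvCnt (fun i => 8 ≤ i ∧ i < 12) l),
           ("优秀", v4 + pvCnt (fun i => 12 ≤ i) l)] := by
  induction l generalizing v0 v1 v2 v3 v4 with
  | nil => simp [pvCnt]
  | cons x xs ih =>
    rw [List.foldl_cons, pv_stepA_shape, ih]
    simp only [pvCnt_cons, ← add_assoc]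

-- bisect_left in the sorted copy counts the elements strictly below the boundary
lemma pv_bl_count (xs : List Int) (c : Int) :
    ((PySem.List.bisectLeft (PySem.List.sorted xs (fun x => x) false) c : Nat) : Int)
      = pvCnt (fun i => i < c) xs := by
  set ys := PySem.List.sorted xs (fun x => x) false with hys
  have hpw : ys.Pairwise (fun a b => a ≤ b) := PySem.List.sorted_pairwise xs (fun x => x)
  obtain ⟨hle, hlt, hge⟩ := PySem.List.bisectLeft_spec ys c hpw
  have hperm : ys.Perm xs := PySem.List.sorted_perm xs (fun x => x) false
  unfold pvCnt
  rw [← hperm.countP_eq]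
  set k := PySem.List.bisectLeft ys c with hk
  have hsplit : ys.countP (fun i => decide (i < c))
      = (ys.take k).countP (fun i => decide (i < c)) + (ys.drop k).countP (fun i => decide (i < c)) := by
    conv_lhs => rw [← List.take_append_drop k ys]
    rw [List.countP_append]
  have hlen : (ys.take k).length = k := by
    rw [List.length_take]; omega
  have h1 : (ys.take k).countP (fun i => decide (i < c)) = k := by
    have hall : ∀ a ∈ ys.take k, (fun i => decide (i < c)) a = true := by
      intro a ha
      obtain ⟨j, hj, rfl⟩ := List.mem_iff_getElem.mp ha
      rw [hlen] at hj
      rw [List.getElem_take]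
      simpa using hlt j (by omega) hj
    have := List.countP_eq_length.mpr hall
    rw [hlen] at this
    exact this
  have h2 : (ys.drop k).countP (fun i => decide (i < c)) = 0 := by
    rw [List.countP_eq_zero]
    intro a ha
    obtain ⟨j, hj, rfl⟩ := List.mem_iff_getElem.mp ha
    rw [List.length_drop] at hj
    rw [List.getElem_drop]
    simpa using hge (k + j) (by omega) (by omega)
  rw [hsplit, h1, h2]
  simp

-- a half-open bucket count is the difference of two "strictly below" counts
lemma pv_cnt_diff (lo hi : Int) (l : List Int) (hlh : lo ≤ hi) :
    pvCnt (fun i => lo ≤ i ∧ i < hi) l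
      = pvCnt (fun i => i < hi) l - pvCnt (fun i => i < lo) l := by
  induction l with
  | nil => simp [pvCnt]
  | cons x xs ih =>
    simp only [pvCnt_cons]
    split_ifs <;> omega

-- the top bucket is everything not strictly below 12
lemma pv_cnt_top (l : List Int) :
    pvCnt (fun i => 12 ≤ i) l = (l.length : Int) - pvCnt (fun i => i < 12) l := by
  induction l with
  | nil => simp [pvCnt]
  | cons x xs ih =>
    simp only [pvCnt_cons, List.length_cons]
    push_cast
    split_ifs <;> omega


-- the lowest bucket, on integers: 0 < i ↔ 1 ≤ i
lemma pv_cnt_low (l : List Int) :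
    pvCnt (fun i => 0 < i ∧ i < 3) l = pvCnt (fun i => 1 ≤ i ∧ i < 3) l := by
  unfold pvCnt
  have h : List.countP (fun i => decide (0 < i ∧ i < 3)) l
      = List.countP (fun i => decide (1 ≤ i ∧ i < 3)) l := by
    apply List.countP_congr
    intro a _
    simp only [decide_eq_true_eq]
    omega
  rw [h]

-- items of the literal 5-key dict (symbolic values)
lemma pv_items5 (v0 v1 v2 v3 v4 : Int) :
    (PySem.Dict.ofList [("较低", v0), ("一般", v1), ("中等", v2), ("较高", v3), ("优秀", v4)]).items
      = [("较低", v0), ("一般", v1), ("中等", v2), ("较高", v3), ("优秀", v4)] := rfl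

-- ===== VERDICT (by name: the statement is the Claim_ definition above) =====
theorem split_level_spec : Claim_equal_split_level := by
  intro squ _
  unfold Spec_split_level
  simp only [split_level, split_level_alt]
  rw [pv_foldA, pv_items5]
  simp only [pvNames, PySem.List.enumerate_cons, PySem.List.enumerate_nil, List.map_cons,
    List.map_nil]
  norm_num [PySem.List.pyGetD]
  simp only [pv_bl_count]
  rw [pv_cnt_low,
      pv_cnt_diff 1 3 squ (by omega), pv_cnt_diff 3 5 squ (by omega),
      pv_cnt_diff 5 8 squ (by omega), pv_cnt_diff 8 12 squ (by omega), pv_cnt_top]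
  exact ⟨rfl, rfl, rfl, rfl, rfl⟩
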